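-- pv_equiv track=rewrite | github.com/actualroger/wizard-ai | code/PlotUtils.py | trimDims
-- ===== SOURCE A (Python) =====
-- def trimDims(L):
--     # returns a list [[a], [b,c], [d,e,f,g]] of the lengths of elements by depth
--     def getLengthTree(lst):
--         if isinstance(lst, list): # if this is a list
--             thisLengths = [[len(lst)]]
--             if len(lst) > 0 and isinstance(lst[0], list): # recurse if necessary
--                 for el in lst:
--                     subLengths = getLengthTree(el)
--                     for j in range(len(subLengths)):
--                         if j + 1 >= len(thisLengths):
--                             thisLengths.append(subLengths[j]) # extend tree
--                         else:
--                             thisLengths[j + 1].extend(subLengths[j]) # merge into tree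
--             return thisLengths
--         return [[1]]  # not a list
--
--     treeLengths = getLengthTree(L)
--     treeLengths = [min(d) for d in treeLengths] # minimum of each length by depth
--
--     def trimDimension(lst, treeLengths, depth=0):
--         if depth >= len(treeLengths):
--             return lst
--         return [trimDimension(el, treeLengths, depth+1) for el in lst[:treeLengths[depth]]]
--
--     return trimDimension(L, treeLengths)
-- ===== SOURCE B (Python) =====
-- def trimDims(L):
--     # One flat pass: with list-of-lists input, A's "per-depth minima" are just
--     # (len(L), min row length), and trimming to len(L) at depth 0 is a no-op.
--     if not L:
--         return []
--     m = min(len(row) for row in L)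
--     return [row[:m] for row in L]
-- ===== Notes on version B (the rewrite author's own statement) =====
-- stated objective: simpler
-- what changed: Replaces A's recursive length-tree construction with merge loop plus recursive trim pass by a single computation of the minimum row length and one map that truncates every row to it (the depth-0 trim is a no-op).
import Mathlib
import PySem

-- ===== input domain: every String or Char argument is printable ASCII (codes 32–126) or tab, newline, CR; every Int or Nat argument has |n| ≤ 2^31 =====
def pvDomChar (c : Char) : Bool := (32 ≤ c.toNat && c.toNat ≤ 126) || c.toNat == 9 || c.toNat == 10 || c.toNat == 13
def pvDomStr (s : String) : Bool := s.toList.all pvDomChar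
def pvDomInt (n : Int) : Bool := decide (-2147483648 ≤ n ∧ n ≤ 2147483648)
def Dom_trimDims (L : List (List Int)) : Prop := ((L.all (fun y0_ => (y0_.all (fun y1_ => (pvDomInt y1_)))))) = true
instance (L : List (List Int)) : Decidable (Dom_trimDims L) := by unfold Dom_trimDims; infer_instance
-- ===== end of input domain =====

-- B replaces A's recursive length-tree merge + recursive trim by one minimum and one map (simpler, same cost).

-- ===== PORT A =====
-- getLengthTree(el) for el : list[int]: thisLengths = [[len(el)]]; the recursion gate
-- 'len(el) > 0 and isinstance(el[0], list)' is False (elements are ints), so it returns [[len el]].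
def pvGetLengthTreeInner (el : List Int) : List (List Int) := [[(el.length : Int)]]

-- the inner 'for j in range(len(subLengths))' merge loop of getLengthTree
def pvMergeStep (acc : List (List Int)) (sub : List (List Int)) : List (List Int) :=
  (List.range sub.length).foldl
    (fun th j =>
      if th.length ≤ j + 1 then th ++ [sub.getD j []]          -- extend tree
      else th.set (j + 1) (th.getD (j + 1) [] ++ sub.getD j [])) -- merge into tree
    acc

-- getLengthTree(L) for L : list[list[int]]
def pvGetLengthTree (L : List (List Int)) : List (List Int) :=
  let this0 : List (List Int) := [[(L.length : Int)]]
  -- gate: 'len(L) > 0 and isinstance(L[0], list)'; L[0] is always a list here (typed input)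
  if 0 < L.length then
    L.foldl (fun th el => pvMergeStep th (pvGetLengthTreeInner el)) this0
  else this0

-- Python min(d); every d in treeLengths is nonempty, so the default is never read
def pvMin (d : List Int) : Int := (PySem.List.min? d (fun x => x)).getD 0

-- trimDimension(x, tl, 2) for an int x: depth 2 ≥ len(tl) always (len(tl) ≤ 2), so x is returned
def pvTrimAtom (x : Int) (_tl : List Int) : Int := x

-- trimDimension(el, tl, 1) for el : list[int]
def pvTrimInner (el : List Int) (tl : List Int) : List Int :=
  if tl.length ≤ 1 then el
  else (PySem.List.slice el none (some (tl.getD 1 0))).map (fun x => pvTrimAtom x tl)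

def trimDims (L : List (List Int)) : List (List Int) :=
  let treeLengths := (pvGetLengthTree L).map pvMin
  -- trimDimension(L, treeLengths, 0)
  if treeLengths.length ≤ 0 then L
  else (PySem.List.slice L none (some (treeLengths.getD 0 0))).map
        (fun el => pvTrimInner el treeLengths)

-- ===== PORT B =====
def trimDims_alt (L : List (List Int)) : List (List Int) :=
  match L with
  | [] => []
  | r :: rs =>
      let m : Nat := rs.foldl (fun a row => min a row.length) r.length  -- min(len(row) for row in L)
      L.map (fun row => row.take m)                                     -- [row[:m] for row in L]

-- ===== PRECONDITION & SPEC =====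
def Spec_trimDims (L : List (List Int)) (out : List (List Int)) : Prop := out = trimDims_alt L
instance (L : List (List Int)) (out : List (List Int)) : Decidable (Spec_trimDims L out) := by unfold Spec_trimDims; infer_instance

-- ===== CLAIM (what is proved, stated in full; the proofs are below) =====
def Claim_equal_trimDims : Prop := ∀ (L : List (List Int)), Dom_trimDims L → Spec_trimDims L (trimDims L)

-- ===== LEMMAS AND PROOFS =====

-- one merge step on a two-level tree appends the new length to level 1
theorem pvMergeStep_two (n : Int) (acc : List Int) (el : List Int) :
    pvMergeStep [[n], acc] (pvGetLengthTreeInner el) = [[n], acc ++ [(el.length : Int)]] := by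
  simp [pvMergeStep, pvGetLengthTreeInner, List.range_succ]

-- the first merge step extends the one-level tree
theorem pvMergeStep_one (n : Int) (el : List Int) :
    pvMergeStep [[n]] (pvGetLengthTreeInner el) = [[n], [(el.length : Int)]] := by
  simp [pvMergeStep, pvGetLengthTreeInner, List.range_succ]

theorem merge_loop (rest : List (List Int)) (n : Int) (acc : List Int) :
    rest.foldl (fun th el => pvMergeStep th (pvGetLengthTreeInner el)) [[n], acc]
      = [[n], acc ++ rest.map (fun x => (x.length : Int))] := by
  induction rest generalizing acc with
  | nil => simp
  | cons e t ih => simp [pvMergeStep_two, ih]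

theorem getLengthTree_cons (r : List Int) (rs : List (List Int)) :
    pvGetLengthTree (r :: rs)
      = [[((r :: rs).length : Int)], (r :: rs).map (fun x => (x.length : Int))] := by
  simp only [pvGetLengthTree, List.foldl_cons, pvMergeStep_one, List.length_cons]
  simp [merge_loop]

-- the Int running minimum over cast lengths is the cast of the Nat running minimum
theorem foldl_min_cast (rs : List (List Int)) (a : Nat) :
    (rs.map (fun x => (x.length : Int))).foldl min (a : Int)
      = ((rs.foldl (fun a row => min a row.length) a : Nat) : Int) := by
  induction rs generalizing a with
  | nil => rfl
  | cons e t ih =>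
      simp only [List.map_cons, List.foldl_cons]
      rw [← Nat.cast_min]
      exact ih _

theorem pvMin_map_len (r : List Int) (rs : List (List Int)) :
    pvMin ((r :: rs).map (fun x => (x.length : Int)))
      = ((rs.foldl (fun a row => min a row.length) r.length : Nat) : Int) := by
  simp only [List.map_cons, pvMin, PySem.List.min?_id_cons, Option.getD_some]
  exact foldl_min_cast rs r.length

-- ===== VERDICT (by name: the statement is the Claim_ definition above) =====
theorem trimDims_spec : Claim_equal_trimDims := by
  intro L _
  show trimDims L = trimDims_alt L
  cases L with
  | nil => rfl
  | cons r rs =>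
      have hm : pvMin [((rs.length + 1 : Nat) : Int)] = ((rs.length + 1 : Nat) : Int) := by
        simp [pvMin, PySem.List.min?_id_cons]
      have hm2 := pvMin_map_len r rs
      simp only [List.map_cons] at hm2
      simp only [trimDims, getLengthTree_cons, List.map_cons, List.map_nil, List.length_cons,
        List.getD_cons_zero, hm, hm2, trimDims_alt]
      rw [PySem.List.slice_to_natCast]
      simp [pvTrimInner, pvTrimAtom, PySem.List.slice_to_natCast, List.take_succ_cons]
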